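-- pv_equiv track=rewrite | github.com/scape-agency/rite | src/rite/string/case/case_to_reverse_each_vowel.py | to_reverse_each_vowel_case
-- ===== SOURCE A (Python) =====
-- def to_reverse_each_vowel_case(text: str) -> str:
--     """
--     Reverses the order of vowels in each word.
--     Example: 'Hello' -> 'Holle'
--
--     Parameters:
--     text (str): The text to convert.
--
--     Returns
--     -------
--     str: The text with vowels in each word reversed.
--     """
--     vowels = "aeiouAEIOU"
--
--     def reverse_vowels(word):
--         vowel_list = [char for char in word if char in vowels]
--         return "".join(
--             vowel_list.pop() if char in vowels else char for char in word
--         )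
--
--     return " ".join(reverse_vowels(word) for word in text.split())
-- ===== SOURCE B (Python) =====
-- def to_reverse_each_vowel_case(text: str) -> str:
--     vowels = "aeiouAEIOU"
--
--     def reverse_vowels(word):
--         cs = list(word)
--         l, r = 0, len(cs) - 1
--         while l < r:
--             if cs[l] not in vowels:
--                 l += 1
--             elif cs[r] not in vowels:
--                 r -= 1
--             else:
--                 cs[l], cs[r] = cs[r], cs[l]
--                 l += 1
--                 r -= 1
--         return "".join(cs)
--
--     return " ".join(reverse_vowels(word) for word in text.split())
-- ===== Notes on version B (the rewrite author's own statement) =====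
-- stated objective: alternative
-- what changed: Per word, replaces A's collect-vowels-then-pop substitution with an in-place two-pointer swap: left and right indices advance past consonants and swap vowel pairs until they meet.
import Mathlib
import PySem

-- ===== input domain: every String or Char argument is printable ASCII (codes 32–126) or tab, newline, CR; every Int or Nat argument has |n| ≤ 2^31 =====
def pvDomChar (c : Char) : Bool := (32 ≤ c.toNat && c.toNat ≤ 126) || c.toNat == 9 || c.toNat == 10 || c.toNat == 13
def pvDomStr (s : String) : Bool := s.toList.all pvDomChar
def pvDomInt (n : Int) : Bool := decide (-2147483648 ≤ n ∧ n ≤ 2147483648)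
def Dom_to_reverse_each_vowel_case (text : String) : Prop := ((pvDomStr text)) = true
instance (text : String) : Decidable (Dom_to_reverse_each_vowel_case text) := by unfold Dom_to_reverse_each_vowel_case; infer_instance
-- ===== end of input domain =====

-- B replaces A's collect-vowels-then-pop substitution per word by a two-pointer in-place
-- swap (alternative decomposition, same cost); whitespace handling (split/join) unchanged.

-- ===== PORT A =====
-- `char in vowels` for a single char = membership in the vowel characters
def pvVow (c : Char) : Bool := "aeiouAEIOU".toList.contains c

-- the generator: 'vowel_list.pop() if char in vowels else char' for char in word
def pvGoA : List Char → List Char → List Char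
  | [], _ => []
  | c :: cs, vl =>
    if pvVow c then
      match vl.getLast? with
      | some v => v :: pvGoA cs vl.dropLast   -- vowel_list.pop()
      | none => pvGoA cs vl                    -- unreachable: vl holds exactly the vowels of the word
    else c :: pvGoA cs vl

def pvRevVowA (w : List Char) : List Char := pvGoA w (w.filter pvVow)

def to_reverse_each_vowel_case (text : String) : String :=
  PySem.Str.join " " ((PySem.Str.split₀ text).map (fun w => String.ofList (pvRevVowA w.toList)))

-- ===== PORT B =====
-- the while loop over the mutable char list; Python list mutation ported as List.set
def pvLoopB (cs : List Char) (l r : Nat) : List Char :=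
  if h : l < r then
    if ¬ pvVow (cs.getD l ' ') then pvLoopB cs (l + 1) r
    else if ¬ pvVow (cs.getD r ' ') then pvLoopB cs l (r - 1)
    else pvLoopB ((cs.set l (cs.getD r ' ')).set r (cs.getD l ' ')) (l + 1) (r - 1)
  else cs
termination_by r - l
decreasing_by all_goals omega

def to_reverse_each_vowel_case_alt (text : String) : String :=
  PySem.Str.join " " ((PySem.Str.split₀ text).map (fun w =>
    let cs := w.toList
    String.ofList (pvLoopB cs 0 (cs.length - 1))))

-- ===== PRECONDITION & SPEC =====
def Spec_to_reverse_each_vowel_case (text : String) (out : String) : Prop := out = to_reverse_each_vowel_case_alt text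
instance (text : String) (out : String) : Decidable (Spec_to_reverse_each_vowel_case text out) := by unfold Spec_to_reverse_each_vowel_case; infer_instance

-- ===== CLAIM (what is proved, stated in full; the proofs are below) =====
def Claim_equal_to_reverse_each_vowel_case : Prop := ∀ (text : String), Dom_to_reverse_each_vowel_case text → Spec_to_reverse_each_vowel_case text (to_reverse_each_vowel_case text)

-- ===== LEMMAS AND PROOFS =====

-- common middle form: substitute the vowels of `m`, front-first, from `vs`
def pvSubst : List Char → List Char → List Char
  | [], _ => []
  | c :: cs, vs =>
    if pvVow c then
      match vs with
      | v :: vs' => v :: pvSubst cs vs'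
      | [] => pvSubst cs []
    else c :: pvSubst cs vs

def pvR (m : List Char) : List Char := pvSubst m (m.filter pvVow).reverse

lemma pvL1 (w : List Char) : ∀ vl, pvGoA w vl = pvSubst w vl.reverse := by
  induction w with
  | nil => intro vl; simp [pvGoA, pvSubst]
  | cons c cs ih =>
    intro vl
    by_cases hc : pvVow c
    · induction vl using List.reverseRecOn with
      | nil => simp [pvGoA, pvSubst, hc, ih]
      | append_singleton vs v _ => simp [pvGoA, pvSubst, hc, ih]
    · simp [pvGoA, pvSubst, hc, ih]

lemma pvLA (m : List Char) : ∀ (ys vs : List Char),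
    pvSubst (m ++ ys) vs = pvSubst m vs ++ pvSubst ys (vs.drop (m.filter pvVow).length) := by
  induction m with
  | nil => intro ys vs; simp [pvSubst]
  | cons c cs ih =>
    intro ys vs
    by_cases hc : pvVow c
    · cases vs with
      | nil => simp [pvSubst, hc, ih]
      | cons v vs' => simp [pvSubst, hc, ih]
    · simp [pvSubst, hc, ih]

lemma pvLB (m : List Char) : ∀ (vs ws : List Char),
    (m.filter pvVow).length ≤ vs.length → pvSubst m (vs ++ ws) = pvSubst m vs := by
  induction m with
  | nil => intro vs ws _; simp [pvSubst]
  | cons c cs ih =>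
    intro vs ws h
    by_cases hc : pvVow c
    · cases vs with
      | nil => simp [hc] at h
      | cons v vs' =>
        simp [hc] at h
        simp [pvSubst, hc, ih vs' ws (by omega)]
    · simp [pvSubst, hc, ih vs ws (by simpa [List.filter_cons, hc] using h)]

lemma pvS0 (m : List Char) (hm : m.length ≤ 1) : pvR m = m := by
  match m, hm with
  | [], _ => simp [pvR, pvSubst]
  | [c], _ =>
    by_cases hc : pvVow c <;> simp [pvR, pvSubst, hc]

lemma pvS1 (c : Char) (m : List Char) (hc : ¬ pvVow c) : pvR (c :: m) = c :: pvR m := by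
  simp [pvR, pvSubst, List.filter_cons, hc]

lemma pvS2 (d : Char) (m : List Char) (hd : ¬ pvVow d) : pvR (m ++ [d]) = pvR m ++ [d] := by
  have hf : (m ++ [d]).filter pvVow = m.filter pvVow := by
    simp [List.filter_append, hd]
  simp only [pvR, hf, pvLA]
  simp [pvSubst, hd]

lemma pvS3 (v w : Char) (mid : List Char) (hv : pvVow v) (hw : pvVow w) :
    pvR (v :: mid ++ [w]) = w :: (pvR mid ++ [v]) := by
  have hf : (v :: mid ++ [w]).filter pvVow = v :: (mid.filter pvVow ++ [w]) := by
    simp [List.filter_append, List.filter_cons, hv, hw]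
  have hrev : (v :: (mid.filter pvVow ++ [w])).reverse
      = w :: ((mid.filter pvVow).reverse ++ [v]) := by simp
  have hdrop : ((mid.filter pvVow).reverse ++ [v]).drop (mid.filter pvVow).length = [v] :=
    List.drop_left' (by simp)
  have h1 : pvSubst (v :: (mid ++ [w])) (w :: ((mid.filter pvVow).reverse ++ [v]))
      = w :: pvSubst (mid ++ [w]) ((mid.filter pvVow).reverse ++ [v]) := by
    simp [pvSubst, hv]
  rw [pvR, hf, hrev, List.cons_append, h1, pvLA,
      pvLB mid ((mid.filter pvVow).reverse) [v] (by simp), hdrop]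
  simp [pvR, pvSubst, hw]

lemma pvGetDMid (p q : List Char) (a d : Char) : (p ++ a :: q).getD p.length d = a := by
  induction p with
  | nil => simp
  | cons b p ih => simpa using ih

lemma pvSetMid (p q : List Char) (a b : Char) : (p ++ a :: q).set p.length b = p ++ b :: q := by
  induction p with
  | nil => simp
  | cons x p ih => simpa using ih

lemma pvL2 : ∀ (n : Nat) (m x y : List Char), m.length = n →
    pvLoopB (x ++ m ++ y) x.length (x.length + m.length - 1) = x ++ pvR m ++ y := by
  intro n
  induction n using Nat.strong_induction_on with
  | _ n IH =>
    intro m x y hm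
    by_cases hn : n ≤ 1
    · rw [pvLoopB]
      rw [dif_neg (by omega)]
      rw [pvS0 m (by omega)]
    · -- n ≥ 2 : m = v :: (mid ++ [w])
      obtain ⟨v, t, rfl⟩ : ∃ v t, m = v :: t := by
        cases m with
        | nil => simp at hm; omega
        | cons a b => exact ⟨a, b, rfl⟩
      have ht : t ≠ [] := by
        intro h; subst h; simp at hm; omega
      obtain ⟨mid, w, rfl⟩ : ∃ mid w, t = mid ++ [w] :=
        ⟨t.dropLast, t.getLast ht, (List.dropLast_append_getLast ht).symm⟩
      have hlen : (v :: (mid ++ [w])).length = mid.length + 2 := by simp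
      have hcons : x ++ (v :: (mid ++ [w])) ++ y = x ++ v :: (mid ++ [w] ++ y) := by simp
      have hgl : (x ++ (v :: (mid ++ [w])) ++ y).getD x.length ' ' = v := by
        rw [hcons]; exact pvGetDMid x _ v ' '
      have hmid : x ++ (v :: (mid ++ [w])) ++ y = (x ++ v :: mid) ++ w :: y := by simp
      have hrpos : x.length + (v :: (mid ++ [w])).length - 1 = (x ++ v :: mid).length := by
        simp <;> omega
      have hgr : (x ++ (v :: (mid ++ [w])) ++ y).getD
          (x.length + (v :: (mid ++ [w])).length - 1) ' ' = w := by
        rw [hrpos, hmid]; exact pvGetDMid (x ++ v :: mid) y w ' '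
      rw [pvLoopB, dif_pos (by simp), hgl, hgr]
      by_cases hv : pvVow v
      · by_cases hw : pvVow w
        · -- both vowels: swap and recurse
          rw [if_neg (by simp [hv]), if_neg (by simp [hw])]
          have hset : ((x ++ (v :: (mid ++ [w])) ++ y).set x.length w).set
              (x.length + (v :: (mid ++ [w])).length - 1) v
              = (x ++ [w]) ++ mid ++ ([v] ++ y) := by
            rw [hcons, pvSetMid x (mid ++ [w] ++ y) v w]
            have e1 : x ++ w :: (mid ++ [w] ++ y) = (x ++ w :: mid) ++ w :: y := by simp
            have e2 : x.length + (v :: (mid ++ [w])).length - 1 = (x ++ w :: mid).length := by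
              simp <;> omega
            rw [e1, e2, pvSetMid (x ++ w :: mid) y w v]
            simp
          rw [hset]
          have hrec := IH mid.length (by omega) mid (x ++ [w]) ([v] ++ y) rfl
          have hidx : x.length + (v :: (mid ++ [w])).length - 1 - 1
              = (x ++ [w]).length + mid.length - 1 := by
            simp <;> omega
          have hl1 : x.length + 1 = (x ++ [w]).length := by simp
          rw [hidx, hl1, hrec, show v :: (mid ++ [w]) = (v :: mid) ++ [w] from rfl,
              pvS3 v w mid hv hw]
          simp
        · -- right not vowel
          rw [if_neg (by simp [hv]), if_pos (by simp [hw])]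
          have hrec := IH (mid.length + 1) (by omega) (v :: mid) x ([w] ++ y) (by simp)
          have harr : x ++ (v :: (mid ++ [w])) ++ y = x ++ (v :: mid) ++ ([w] ++ y) := by simp
          have hidx : x.length + (v :: (mid ++ [w])).length - 1 - 1
              = x.length + (v :: mid).length - 1 := by simp <;> omega
          rw [harr, hidx, hrec, show v :: (mid ++ [w]) = (v :: mid) ++ [w] from rfl,
              pvS2 w (v :: mid) hw]
          simp
      · -- left not vowel
        rw [if_pos (by simp [hv])]
        have hrec := IH (mid.length + 1) (by omega) (mid ++ [w]) (x ++ [v]) y (by simp)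
        have harr : x ++ (v :: (mid ++ [w])) ++ y = (x ++ [v]) ++ (mid ++ [w]) ++ y := by simp
        have hidx : x.length + (v :: (mid ++ [w])).length - 1
            = (x ++ [v]).length + (mid ++ [w]).length - 1 := by simp <;> omega
        have hl1 : x.length + 1 = (x ++ [v]).length := by simp
        rw [hidx, hl1, harr, hrec, pvS1 v (mid ++ [w]) hv]
        simp

lemma pvWordEq (cs : List Char) : pvRevVowA cs = pvLoopB cs 0 (cs.length - 1) := by
  have := pvL2 cs.length cs [] [] rfl
  simp only [List.nil_append, List.append_nil, List.length_nil, Nat.zero_add] at this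
  rw [this, pvRevVowA, pvL1, pvR]

-- ===== VERDICT (by name: the statement is the Claim_ definition above) =====
theorem to_reverse_each_vowel_case_spec : Claim_equal_to_reverse_each_vowel_case := by
  intro text _
  unfold Spec_to_reverse_each_vowel_case to_reverse_each_vowel_case to_reverse_each_vowel_case_alt
  congr 1
  apply List.map_congr_left
  intro w _
  simp only [pvWordEq]
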